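-- pv_equiv track=rewrite | github.com/sambow23/blender-remix | rtx_remix_importer/operators/export_operator.py | extract_base_material_name
-- ===== SOURCE A (Python) =====
-- def extract_base_material_name(material_name):
--     """Extract base material name by removing hash suffixes.
--
--     Example: 'mat_90ABF9B7573AA175_ed309fea_c0e78a85' -> 'mat_90ABF9B7573AA175'
--     """
--     # Split by underscore and look for hash patterns
--     parts = material_name.split('_')
--
--     # Hash suffixes are typically 8 characters of hex
--     # Keep parts until we find what looks like a hash suffix
--     base_parts = []
--     for part in parts:
--         # If this part looks like a hash (8 hex chars), stop here
--         if len(part) == 8 and all(c in '0123456789abcdefABCDEF' for c in part):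
--             break
--         base_parts.append(part)
--
--     # If we didn't find any hash patterns, return the original name
--     if len(base_parts) == len(parts):
--         return material_name
--
--     return '_'.join(base_parts)
-- ===== SOURCE B (Python) =====
-- def extract_base_material_name(material_name):
--     """Extract base material name by removing hash suffixes.
--
--     Single pass over the characters with a cursor: track where the current
--     underscore-delimited token starts; as soon as a token is exactly 8 hex
--     chars, slice the name just before it (no split/join round-trip).
--     """
--     hex_digits = '0123456789abcdefABCDEF'
--     cut = 0          # index where the current token starts
--     token = ''       # current token accumulated so far
--     for i, c in enumerate(material_name):
--         if c == '_':
--             if len(token) == 8 and all(ch in hex_digits for ch in token):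
--                 return material_name[:cut - 1] if cut else ''
--             cut = i + 1
--             token = ''
--         else:
--             token += c
--     if len(token) == 8 and all(ch in hex_digits for ch in token):
--         return material_name[:cut - 1] if cut else ''
--     return material_name
-- ===== Notes on version B (the rewrite author's own statement) =====
-- stated objective: alternative
-- what changed: A splits the name into a list of underscore-separated parts, scans the parts for the first 8-hex-char token and joins the kept parts back together; B makes one pass over the characters with a cursor marking where the current token starts and slices the original string just before the first hash token, so no part list is built and no join round-trip happens.
import Mathlib
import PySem

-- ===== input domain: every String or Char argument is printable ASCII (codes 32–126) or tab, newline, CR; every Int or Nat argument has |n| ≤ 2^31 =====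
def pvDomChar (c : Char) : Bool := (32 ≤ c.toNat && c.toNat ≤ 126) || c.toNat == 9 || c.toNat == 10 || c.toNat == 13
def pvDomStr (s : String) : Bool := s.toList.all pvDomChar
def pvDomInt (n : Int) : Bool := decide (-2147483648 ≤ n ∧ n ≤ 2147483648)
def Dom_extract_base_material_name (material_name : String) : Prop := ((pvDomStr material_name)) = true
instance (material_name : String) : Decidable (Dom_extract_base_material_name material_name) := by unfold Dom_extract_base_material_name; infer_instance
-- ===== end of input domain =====

-- B replaces A's split-into-parts / scan / join round-trip by a single character
-- scan with a cursor that slices the original string just before the first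
-- 8-hex-char token (objective: alternative single-pass formulation).

-- ===== PORT A =====
-- the hex alphabet A tests membership in
def pvHexA : List Char := "0123456789abcdefABCDEF".toList

-- `len(part) == 8 and all(c in '0123…' for c in part)`
def pvLooksLikeHash (part : List Char) : Bool :=
  part.length == 8 && part.all (fun c => pvHexA.contains c)

-- A's `for part in parts: … break / base_parts.append(part)` loop
def pvCollectBase : List (List Char) → List (List Char) → List (List Char)
  | [], base => base
  | p :: ps, base => if pvLooksLikeHash p then base else pvCollectBase ps (base ++ [p])

def extract_base_material_name (material_name : String) : String :=
  let parts := PySem.Chars.splitOn material_name.toList ['_']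
  let base_parts := pvCollectBase parts []
  if base_parts.length = parts.length then material_name
  else String.ofList (PySem.Chars.join ['_'] base_parts)

-- ===== PORT B =====
-- `len(token) == 8 and all(ch in hex_digits for ch in token)`
def pvIsHex8 (token : List Char) : Bool :=
  token.length == 8 && token.all (fun ch => "0123456789abcdefABCDEF".toList.contains ch)

-- B's `for i, c in enumerate(material_name)` loop; `name[:cut-1]` with cut ≥ 1
-- is an in-range slice, hence exactly `List.take (cut - 1)`.
def pvScan (name : List Char) (rest : List Char) (i cut : Nat) (token : List Char) : String :=
  match rest with
  | [] =>
      if pvIsHex8 token then (if cut = 0 then "" else String.ofList (name.take (cut - 1)))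
      else String.ofList name
  | c :: cs =>
      if c = '_' then
        if pvIsHex8 token then (if cut = 0 then "" else String.ofList (name.take (cut - 1)))
        else pvScan name cs (i + 1) (i + 1) []
      else pvScan name cs (i + 1) cut (token ++ [c])

def extract_base_material_name_alt (material_name : String) : String :=
  pvScan material_name.toList material_name.toList 0 0 []

-- ===== PRECONDITION & SPEC =====
def Spec_extract_base_material_name (material_name : String) (out : String) : Prop := out = extract_base_material_name_alt material_name
instance (material_name : String) (out : String) : Decidable (Spec_extract_base_material_name material_name out) := by unfold Spec_extract_base_material_name; infer_instance

-- ===== CLAIM (what is proved, stated in full; the proofs are below) =====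
def Claim_equal_extract_base_material_name : Prop := ∀ (material_name : String), Dom_extract_base_material_name material_name → Spec_extract_base_material_name material_name (extract_base_material_name material_name)

-- ===== LEMMAS AND PROOFS =====

-- split on a single underscore, structurally
def splitCh : List Char → List (List Char)
  | [] => [[]]
  | c :: cs => if c = '_' then [] :: splitCh cs else (splitCh cs).modifyHead (fun h => c :: h)

theorem splitCh_ne_nil : ∀ cs : List Char, splitCh cs ≠ []
  | [] => by simp [splitCh]
  | c :: cs => by
    simp only [splitCh]
    split
    · simp
    · have hne := splitCh_ne_nil cs
      cases h : splitCh cs with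
      | nil => exact absurd h hne
      | cons a t => simp


theorem splitCh_no_us (cs : List Char) (h : '_' ∉ cs) : splitCh cs = [cs] := by
  induction cs with
  | nil => rfl
  | cons c cs ih =>
    simp only [List.mem_cons, not_or] at h
    simp [splitCh, Ne.symm h.1, ih h.2]

theorem splitCh_append_us (xs ys : List Char) :
    splitCh (xs ++ '_' :: ys) = splitCh xs ++ splitCh ys := by
  induction xs with
  | nil => simp [splitCh]
  | cons c cs ih =>
    by_cases hc : c = '_'
    · simp [splitCh, hc, ih]
    · obtain ⟨h, t, hht⟩ : ∃ h t, splitCh cs = h :: t := by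
        cases hs : splitCh cs with
        | nil => exact absurd hs (splitCh_ne_nil cs)
        | cons h t => exact ⟨h, t, rfl⟩
      simp [splitCh, hc, ih, hht]

theorem intercalate_splitCh (cs : List Char) :
    List.intercalate ['_'] (splitCh cs) = cs := by
  induction cs with
  | nil => simp [splitCh, List.intercalate]
  | cons c cs ih =>
    obtain ⟨h, t, hht⟩ : ∃ h t, splitCh cs = h :: t := by
      cases hs : splitCh cs with
      | nil => exact absurd hs (splitCh_ne_nil cs)
      | cons h t => exact ⟨h, t, rfl⟩
    by_cases hc : c = '_'
    · rw [hc] at *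
      simp only [splitCh, if_pos]
      rw [hht] at ih ⊢
      simp [List.intercalate, List.intersperse] at ih ⊢
      exact ih
    · simp only [splitCh, if_neg hc, hht, List.modifyHead_cons]
      rw [hht] at ih
      cases t with
      | nil => simpa [List.intercalate] using congrArg (c :: ·) ih
      | cons y t' =>
        simp [List.intercalate, List.intersperse] at ih ⊢
        exact ih

theorem go_spec (l : List Char) : ∀ (fuel : Nat) (cur : List Char) (acc : List (List Char)),
    l.length < fuel →
    PySem.Chars.splitOn.go ['_'] fuel l cur acc
      = acc.reverse ++ (splitCh l).modifyHead (fun h => cur.reverse ++ h) := by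
  induction l with
  | nil =>
    intro fuel cur acc hf
    cases fuel with
    | zero => omega
    | succ f => simp [PySem.Chars.splitOn.go, splitCh]
  | cons c cs ih =>
    intro fuel cur acc hf
    cases fuel with
    | zero => omega
    | succ f =>
      have hcs : cs.length < f := by simpa using hf
      by_cases hc : c = '_'
      · subst hc
        rw [PySem.Chars.splitOn.go]
        simp only [List.isPrefixOf, BEq.rfl, Bool.true_and, if_pos]
        rw [show List.drop ['_'].length ('_' :: cs) = cs from rfl,
          ih f [] (cur.reverse :: acc) hcs]
        obtain ⟨h, t, hht⟩ : ∃ h t, splitCh cs = h :: t := by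
          cases hs : splitCh cs with
          | nil => exact absurd hs (splitCh_ne_nil cs)
          | cons h t => exact ⟨h, t, rfl⟩
        simp [splitCh, hht]
      · rw [PySem.Chars.splitOn.go]
        have : (['_'].isPrefixOf (c :: cs)) = false := by
          simp [List.isPrefixOf]
          exact fun h => absurd h.symm hc
        rw [if_neg (by simp [this])]
        rw [ih f (c :: cur) acc hcs]
        obtain ⟨h, t, hht⟩ : ∃ h t, splitCh cs = h :: t := by
          cases hs : splitCh cs with
          | nil => exact absurd hs (splitCh_ne_nil cs)
          | cons h t => exact ⟨h, t, rfl⟩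
        simp [splitCh, hc, hht]

theorem splitOn_eq_splitCh (cs : List Char) :
    PySem.Chars.splitOn cs ['_'] = splitCh cs := by
  rw [PySem.Chars.splitOn, go_spec cs (cs.length + 1) [] [] (by omega)]
  obtain ⟨h, t, hht⟩ : ∃ h t, splitCh cs = h :: t := by
    cases hs : splitCh cs with
    | nil => exact absurd hs (splitCh_ne_nil cs)
    | cons h t => exact ⟨h, t, rfl⟩
  simp [hht]

theorem collect_spec (ps : List (List Char)) : ∀ base,
    pvCollectBase ps base = base ++ ps.takeWhile (fun p => !pvLooksLikeHash p) := by
  induction ps with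
  | nil => intro base; simp [pvCollectBase]
  | cons p ps ih =>
    intro base
    by_cases hp : pvLooksLikeHash p
    · simp [pvCollectBase, hp]
    · simp [pvCollectBase, hp, ih]

theorem takeWhile_all_append (p : List Char → Bool) (l1 : List (List Char)) (a : List Char)
    (l2 : List (List Char)) (h1 : ∀ x ∈ l1, p x = true) (ha : p a = false) :
    (l1 ++ a :: l2).takeWhile p = l1 := by
  induction l1 with
  | nil => simp [ha]
  | cons x xs ih =>
    simp only [List.mem_cons] at h1
    simp [h1 x (Or.inl rfl), ih (fun y hy => h1 y (Or.inr hy))]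

-- B's inline hash test is the same predicate as A's
theorem pvIsHex8Eq : pvIsHex8 = pvLooksLikeHash := rfl

theorem takeWhile_length_eq_iff (p : List Char → Bool) (l : List (List Char)) :
    ((l.takeWhile p).length = l.length) ↔ l.all p = true := by
  constructor
  · intro h
    rw [List.all_eq_true]
    exact List.takeWhile_eq_self_iff.mp ((List.takeWhile_prefix p).eq_of_length h)
  · intro h
    rw [List.takeWhile_eq_self_iff.mpr (List.all_eq_true.mp h)]

theorem scan_spec (rest : List Char) : ∀ (pre token : List Char) (done : List (List Char)),
    '_' ∉ token →
    ((pre = [] ∧ done = []) ∨ (∃ q, pre = q ++ ['_'] ∧ done = splitCh q)) →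
    (∀ p ∈ done, pvLooksLikeHash p = false) →
    pvScan (pre ++ token ++ rest) rest (pre.length + token.length) pre.length token
      = (if (splitCh (pre ++ token ++ rest)).all (fun p => !pvLooksLikeHash p)
         then String.ofList (pre ++ token ++ rest)
         else String.ofList (List.intercalate ['_']
            ((splitCh (pre ++ token ++ rest)).takeWhile (fun p => !pvLooksLikeHash p)))) := by
  induction rest with
  | nil =>
    intro pre token done htok hp hdone
    rcases hp with ⟨hpre, hdn⟩ | ⟨q, hq, hdn⟩
    · subst hpre; subst hdn
      by_cases hh : pvLooksLikeHash token = true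
      · simp [pvScan, pvIsHex8Eq, hh, splitCh_no_us token htok, List.intercalate]
      · simp [pvScan, pvIsHex8Eq, hh, splitCh_no_us token htok]
    · subst hq; subst hdn
      have hsplit : splitCh (q ++ '_' :: token) = splitCh q ++ [token] := by
        rw [splitCh_append_us, splitCh_no_us token htok]
      have htake : (q ++ '_' :: token).take q.length = q := by simp
      have hdq : (splitCh q).all (fun p => !pvLooksLikeHash p) = true :=
        List.all_eq_true.mpr fun x hx => by simp [hdone x hx]
      by_cases hh : pvLooksLikeHash token = true
      · have htw : (splitCh q ++ [token]).takeWhile (fun p => !pvLooksLikeHash p)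
            = splitCh q :=
          takeWhile_all_append _ _ _ [] (fun x hx => by simp [hdone x hx]) (by simp [hh])
        simp [pvScan, pvIsHex8Eq, hh, hsplit, htake, htw, intercalate_splitCh,
          List.all_append]
      · simp [pvScan, pvIsHex8Eq, hh, hsplit, hdq, List.all_append]
  | cons c cs ih =>
    intro pre token done htok hp hdone
    by_cases hc : c = '_'
    · subst hc
      by_cases hh : pvLooksLikeHash token = true
      · -- the current token is a hash: both sides cut here
        rcases hp with ⟨hpre, hdn⟩ | ⟨q, hq, hdn⟩
        · subst hpre; subst hdn
          have hsplit : splitCh (token ++ '_' :: cs) = token :: splitCh cs := by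
            rw [splitCh_append_us, splitCh_no_us token htok, List.singleton_append]
          have htw : (token :: splitCh cs).takeWhile (fun p => !pvLooksLikeHash p) = [] := by
            simp [hh]
          simp [pvScan, pvIsHex8Eq, hh, hsplit, htw, List.intercalate]
        · subst hq; subst hdn
          have hsplit : splitCh (q ++ '_' :: (token ++ '_' :: cs))
              = splitCh q ++ token :: splitCh cs := by
            rw [splitCh_append_us, splitCh_append_us, splitCh_no_us token htok,
              List.singleton_append]
          have htake : (q ++ '_' :: (token ++ '_' :: cs)).take q.length = q := by simp
          have htw : (splitCh q ++ token :: splitCh cs).takeWhile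
              (fun p => !pvLooksLikeHash p) = splitCh q :=
            takeWhile_all_append _ _ _ _ (fun x hx => by simp [hdone x hx]) (by simp [hh])
          simp [pvScan, pvIsHex8Eq, hh, hsplit, htake, htw, intercalate_splitCh,
            List.all_append]
      · -- token closed without being a hash: keep scanning with a fresh token
        have hdone' : ∀ p ∈ splitCh (pre ++ token), pvLooksLikeHash p = false := by
          rcases hp with ⟨hpre, hdn⟩ | ⟨q, hq, hdn⟩
          · subst hpre; subst hdn
            simp only [List.nil_append, splitCh_no_us token htok, List.mem_singleton]
            rintro p rfl; simpa using hh
          · subst hq; subst hdn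
            intro p hpmem
            rw [List.append_assoc, List.singleton_append, splitCh_append_us,
              splitCh_no_us token htok] at hpmem
            rcases List.mem_append.mp hpmem with h1 | h1
            · exact hdone p h1
            · simp only [List.mem_singleton] at h1; subst h1; simpa using hh
        have hrec := ih (pre ++ token ++ ['_']) [] (splitCh (pre ++ token)) (by simp)
          (Or.inr ⟨pre ++ token, rfl, rfl⟩) hdone'
        simp only [List.append_nil, List.length_append, List.length_cons, List.length_nil,
          List.append_assoc, List.cons_append, Nat.add_zero, Nat.zero_add] at hrec ⊢
        simp only [pvScan, pvIsHex8Eq, if_neg hh]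
        rw [if_pos trivial, Nat.add_assoc]
        exact hrec
    · -- ordinary character: extend the current token
      have hrec := ih pre (token ++ [c]) done
        (by intro hmem
            rcases List.mem_append.mp hmem with h | h
            · exact htok h
            · rw [List.mem_singleton] at h; exact hc h.symm)
        hp hdone
      simp only [List.append_assoc, List.cons_append, List.length_append,
        List.length_cons, List.length_nil, Nat.zero_add] at hrec ⊢
      simp only [pvScan]
      rw [if_neg hc, Nat.add_assoc]
      exact hrec

-- ===== VERDICT (by name: the statement is the Claim_ definition above) =====
theorem extract_base_material_name_spec : Claim_equal_extract_base_material_name := by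
  intro s _
  unfold Spec_extract_base_material_name extract_base_material_name extract_base_material_name_alt
  have hB := scan_spec s.toList [] [] [] (by simp) (Or.inl ⟨rfl, rfl⟩) (by simp)
  simp only [List.nil_append, List.length_nil, Nat.add_zero] at hB
  rw [hB, splitOn_eq_splitCh]
  simp only [collect_spec, List.nil_append]
  by_cases hall : (splitCh s.toList).all (fun p => !pvLooksLikeHash p) = true
  · rw [if_pos ((takeWhile_length_eq_iff _ _).mpr hall), if_pos hall]
    exact String.ofList_toList.symm
  · rw [if_neg (fun h => hall ((takeWhile_length_eq_iff _ _).mp h)), if_neg hall]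
    rfl
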